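-- pv_equiv track=rewrite | github.com/Annesha21/MindLens | metamorph2025/main.py | build_display_names
-- ===== SOURCE A (Python) =====
-- from typing import Tuple, List, Dict
--
-- FER_EMOTIONS = ["angry", "disgust", "fear", "happy", "sad", "surprise", "neutral"]
--
-- def build_display_names(class_names: List[str]) -> List[str]:
--     """
--     Create friendly display names (emotion words) for each class index.
--     Rules:
--       - If a class_name already contains alphabetic characters (e.g., 'happy'), use it.
--       - Else, if classes are numeric strings and form 0..6, map to FER_EMOTIONS.
--       - Else, keep original class_name.
--     """
--     # if already words, return them lowercased (clean)
--     alpha_names = [cn for cn in class_names if any(c.isalpha() for c in cn)]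
--     if len(alpha_names) == len(class_names):
--         # all are "word-like" -> normalize casing
--         return [cn.lower() for cn in class_names]
--
--     # try numeric detection
--     numeric_flags = []
--     numeric_values = []
--     for cn in class_names:
--         try:
--             v = int(cn)
--             numeric_flags.append(True)
--             numeric_values.append(v)
--         except Exception:
--             numeric_flags.append(False)
--             numeric_values.append(None)
--
--     # all numeric and within 0..6 -> map to FER_EMOTIONS
--     if all(numeric_flags):
--         max_v = max([v for v in numeric_values if v is not None])
--         min_v = min([v for v in numeric_values if v is not None])
--         if 0 <= min_v and max_v <= 6:
--             # map numeric index to FER list (handles unordered class_names as well)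
--             # create mapping index->FER label by matching index positions
--             # class_names may be like ['0','1','2'] but LabelEncoder ensured index order matches class_names order
--             mapped = []
--             for cn in class_names:
--                 idx = int(cn)
--                 label = FER_EMOTIONS[idx] if idx < len(FER_EMOTIONS) else cn
--                 mapped.append(label)
--             return mapped
--         else:
--             # numeric but outside 0..6 -> try partial mapping for 0..6 and leave others numeric
--             mapped = []
--             for cn in class_names:
--                 try:
--                     idx = int(cn)
--                     if 0 <= idx < len(FER_EMOTIONS):
--                         mapped.append(FER_EMOTIONS[idx])
--                     else:
--                         mapped.append(cn)
--                 except Exception: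
--                     mapped.append(cn)
--             return mapped
--
--     # mixed names: use alphabetic ones lowercased and keep numeric as-is
--     out = []
--     for cn in class_names:
--         if any(c.isalpha() for c in cn):
--             out.append(cn.lower())
--         else:
--             out.append(cn)
--     return out
-- ===== SOURCE B (Python) =====
-- from typing import List
--
-- FER_EMOTIONS = ["angry", "disgust", "fear", "happy", "sad", "surprise", "neutral"]
--
-- def build_display_names(class_names: List[str]) -> List[str]:
--     # Single fused pass: build both candidate outputs and the global flags
--     # together, then select at the end (vs A's staged scans and branches).
--     all_word = True
--     all_num = True
--     num_out = []   # value under the numeric-mapping rule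
--     word_out = []  # value under the lowercase-wordlike rule
--     for cn in class_names:
--         wordlike = any(c.isalpha() for c in cn)
--         all_word = all_word and wordlike
--         word_out.append(cn.lower() if wordlike else cn)
--         try:
--             v = int(cn)
--             num_out.append(FER_EMOTIONS[v] if 0 <= v < len(FER_EMOTIONS) else cn)
--         except ValueError:
--             all_num = False
--             num_out.append(cn)
--     if class_names and all_num and not all_word:
--         return num_out
--     return word_out
-- ===== Notes on version B (the rewrite author's own statement) =====
-- stated objective: alternative
-- what changed: B is one fused pass with an accumulator that simultaneously builds both candidate outputs (numeric-mapped and lowercase-wordlike) plus two global flags, then selects one list at the end, instead of A's cascaded branch structure with separate staged scans (filter, parse loop, dead min/max scan, per-branch mapping loops).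
import Mathlib
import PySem

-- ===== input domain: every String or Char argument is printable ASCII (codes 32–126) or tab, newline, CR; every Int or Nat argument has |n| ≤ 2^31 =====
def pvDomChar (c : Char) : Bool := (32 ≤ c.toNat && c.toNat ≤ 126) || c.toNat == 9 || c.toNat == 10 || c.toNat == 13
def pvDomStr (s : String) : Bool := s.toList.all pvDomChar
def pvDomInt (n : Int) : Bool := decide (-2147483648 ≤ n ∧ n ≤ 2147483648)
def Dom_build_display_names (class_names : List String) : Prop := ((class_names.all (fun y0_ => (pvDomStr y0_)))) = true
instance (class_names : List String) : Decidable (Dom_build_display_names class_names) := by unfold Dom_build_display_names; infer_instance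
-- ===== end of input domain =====

-- B replaces A's cascaded branches and staged scans by ONE fused pass that builds both
-- candidate outputs plus two flags, selecting at the end; objective: alternative.

def pvFER : List String := ["angry", "disgust", "fear", "happy", "sad", "surprise", "neutral"]

-- any(c.isalpha() for c in cn)
def pvWordlike (cn : String) : Bool := cn.toList.any PySem.Chars.isalpha

-- ===== PORT A =====
def build_display_names (class_names : List String) : List String :=
  let alpha_names := class_names.filter (fun cn => pvWordlike cn)
  if alpha_names.length = class_names.length then
    class_names.map (fun cn => PySem.Str.lower cn)
  else
    -- the loop appending to numeric_flags and numeric_values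
    let fv := class_names.foldl (fun (acc : List Bool × List (Option Int)) cn =>
      match PySem.Int.ofStr? cn with
      | some v => (acc.1 ++ [true], acc.2 ++ [some v])
      | none => (acc.1 ++ [false], acc.2 ++ [none])) ([], [])
    let numeric_flags := fv.1
    let numeric_values := fv.2
    if numeric_flags.all (fun b => b) then
      let vals := numeric_values.filterMap (fun v => v)
      -- in Python max/min here raise on []; this branch forces class_names ≠ [] so vals ≠ [] and the getD default is never used
      let max_v := (PySem.List.max? vals (fun v => v)).getD 0
      let min_v := (PySem.List.min? vals (fun v => v)).getD 0
      if 0 ≤ min_v ∧ max_v ≤ 6 then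
        class_names.foldl (fun mapped cn =>
          -- int(cn) succeeds here (all flags are true), so the getD default is never used
          let idx := (PySem.Int.ofStr? cn).getD 0
          mapped ++ [if idx < (pvFER.length : Int) then PySem.List.pyGetD pvFER idx cn else cn]) []
      else
        class_names.foldl (fun mapped cn =>
          mapped ++ [match PySem.Int.ofStr? cn with
            | some idx => if 0 ≤ idx ∧ idx < (pvFER.length : Int) then PySem.List.pyGetD pvFER idx cn else cn
            | none => cn]) []
    else
      class_names.foldl (fun out cn =>
        out ++ [if pvWordlike cn then PySem.Str.lower cn else cn]) []

-- ===== PORT B =====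
-- state: (all_word, all_num, num_out, word_out), updated once per name
def build_display_names_alt (class_names : List String) : List String :=
  let st := class_names.foldl
    (fun (st : Bool × Bool × List String × List String) cn =>
      let wordlike := pvWordlike cn
      let all_word := st.1 && wordlike
      let word_out := st.2.2.2 ++ [if wordlike then PySem.Str.lower cn else cn]
      match PySem.Int.ofStr? cn with
      | some v =>
          (all_word, st.2.1,
           st.2.2.1 ++ [if 0 ≤ v ∧ v < (pvFER.length : Int) then PySem.List.pyGetD pvFER v cn else cn],
           word_out)
      | none => (all_word, false, st.2.2.1 ++ [cn], word_out))
    (true, true, [], [])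
  if !class_names.isEmpty && st.2.1 && !st.1 then st.2.2.1 else st.2.2.2

-- ===== PRECONDITION & SPEC =====
def Spec_build_display_names (class_names : List String) (out : List String) : Prop := out = build_display_names_alt class_names
instance (class_names : List String) (out : List String) : Decidable (Spec_build_display_names class_names out) := by unfold Spec_build_display_names; infer_instance

-- ===== CLAIM (what is proved, stated in full; the proofs are below) =====
def Claim_equal_build_display_names : Prop := ∀ (class_names : List String), Dom_build_display_names class_names → Spec_build_display_names class_names (build_display_names class_names)

-- ===== LEMMAS AND PROOFS =====

-- the per-element rule of the numeric-mapping output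
def pvNum (cn : String) : String :=
  match PySem.Int.ofStr? cn with
  | some v => if 0 ≤ v ∧ v < (pvFER.length : Int) then PySem.List.pyGetD pvFER v cn else cn
  | none => cn

-- the per-element rule of the lowercase-wordlike output
def pvWord (cn : String) : String := if pvWordlike cn then PySem.Str.lower cn else cn

-- A's flags/values loop builds the two lists
theorem pvPairLoop (cns : List String) (fs : List Bool) (vs : List (Option Int)) :
    cns.foldl (fun (acc : List Bool × List (Option Int)) cn =>
      match PySem.Int.ofStr? cn with
      | some v => (acc.1 ++ [true], acc.2 ++ [some v])
      | none => (acc.1 ++ [false], acc.2 ++ [none])) (fs, vs)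
    = (fs ++ cns.map (fun cn => (PySem.Int.ofStr? cn).isSome),
       vs ++ cns.map (fun cn => PySem.Int.ofStr? cn)) := by
  induction cns generalizing fs vs with
  | nil => simp
  | cons c t ih =>
    simp only [List.foldl_cons, List.map_cons]
    cases PySem.Int.ofStr? c <;> simp [ih]

-- the invariant of B's fused loop: flags are conjunctions, outputs are maps
theorem pvAltLoop (cns : List String) (aw an : Bool) (no wo : List String) :
    cns.foldl
      (fun (st : Bool × Bool × List String × List String) cn =>
        let wordlike := pvWordlike cn
        let all_word := st.1 && wordlike
        let word_out := st.2.2.2 ++ [if wordlike then PySem.Str.lower cn else cn]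
        match PySem.Int.ofStr? cn with
        | some v =>
            (all_word, st.2.1,
             st.2.2.1 ++ [if 0 ≤ v ∧ v < (pvFER.length : Int) then PySem.List.pyGetD pvFER v cn else cn],
             word_out)
        | none => (all_word, false, st.2.2.1 ++ [cn], word_out))
      (aw, an, no, wo)
    = (aw && cns.all (fun cn => pvWordlike cn),
       an && cns.all (fun cn => (PySem.Int.ofStr? cn).isSome),
       no ++ cns.map pvNum, wo ++ cns.map pvWord) := by
  induction cns generalizing aw an no wo with
  | nil => simp
  | cons c t ih =>
    simp only [List.foldl_cons, List.map_cons, List.all_cons]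
    cases h : PySem.Int.ofStr? c <;>
      simp [ih, pvNum, pvWord, h, Bool.and_assoc]

theorem build_display_names_spec : Claim_equal_build_display_names := by
  unfold Claim_equal_build_display_names
  intro cns _
  unfold Spec_build_display_names build_display_names build_display_names_alt
  simp only [pvPairLoop, pvAltLoop, Bool.true_and, List.nil_append,
    PySem.List.foldl_append_singleton_eq_map (f := fun cn => if pvWordlike cn then PySem.Str.lower cn else cn)]
  by_cases hAll : ∀ cn ∈ cns, pvWordlike cn = true
  · -- all word-like: A lowercases, B's word_out does the same
    have hfil : (cns.filter (fun cn => pvWordlike cn)).length = cns.length :=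
      List.length_filter_eq_length_iff.mpr hAll
    have hBall : (cns.all (fun cn => pvWordlike cn)) = true := List.all_eq_true.mpr hAll
    rw [if_pos hfil, hBall]
    rw [show (!cns.isEmpty && cns.all (fun cn => (PySem.Int.ofStr? cn).isSome) && !true) = false by simp,
       if_neg (by simp : ¬(false = true))]
    exact (List.map_congr_left fun cn hc => by simp [pvWord, hAll cn hc]).symm
  · -- not all word-like
    have hne : cns ≠ [] := by rintro rfl; exact hAll (by simp)
    have hfil : ¬ ((cns.filter (fun cn => pvWordlike cn)).length = cns.length) := by
      rw [List.length_filter_eq_length_iff]; exact hAll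
    have hBall : (cns.all (fun cn => pvWordlike cn)) = false := by
      rw [Bool.eq_false_iff]; intro h; exact hAll (List.all_eq_true.mp h)
    rw [if_neg hfil, hBall]
    by_cases hP : ∀ cn ∈ cns, (PySem.Int.ofStr? cn).isSome = true
    · -- every name parses: both sides reduce to cns.map pvNum
      have hflags : ((cns.map (fun cn => (PySem.Int.ofStr? cn).isSome)).all (fun b => b)) = true := by
        simp [List.all_eq_true]; exact hP
      have hBnum : (cns.all (fun cn => (PySem.Int.ofStr? cn).isSome)) = true := List.all_eq_true.mpr hP
      have hBcond : (!cns.isEmpty && cns.all (fun cn => (PySem.Int.ofStr? cn).isSome) && !false) = true := by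
        rw [hBnum]; simp [hne]
      rw [hflags, if_pos rfl, hBcond, if_pos rfl]
      set vals := (cns.map (fun cn => PySem.Int.ofStr? cn)).filterMap (fun v => v) with hvals
      by_cases hrng : 0 ≤ (PySem.List.min? vals (fun v => v)).getD 0 ∧ (PySem.List.max? vals (fun v => v)).getD 0 ≤ 6
      · rw [if_pos hrng]
        -- every parsed value is ≥ min_v ≥ 0, so A's `idx < 7` test agrees with pvNum's `0 ≤ idx < 7`
        have hvne : vals ≠ [] := by
          obtain ⟨c, t, rfl⟩ := List.exists_cons_of_ne_nil hne
          obtain ⟨v, hv⟩ := Option.isSome_iff_exists.mp (hP c (by simp))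
          simp [hvals, hv]
        obtain ⟨m, hm⟩ := Option.ne_none_iff_exists'.mp
          (by rwa [Ne, PySem.List.min?_eq_none_iff] : PySem.List.min? vals (fun v => v) ≠ none)
        have hmin := PySem.List.min?_isMin hm
        rw [PySem.List.foldl_append_singleton_eq_map, List.nil_append]
        apply List.map_congr_left
        intro cn hc
        obtain ⟨v, hv⟩ := Option.isSome_iff_exists.mp (hP cn hc)
        have hvmem : v ∈ vals := by
          simp only [hvals, List.mem_filterMap]
          exact ⟨some v, List.mem_map.mpr ⟨cn, hc, hv⟩, rfl⟩
        have h0v : 0 ≤ v := le_trans (by rw [hm] at hrng; simpa using hrng.1) (hmin v hvmem)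
        simp only [pvNum, hv, Option.getD_some]
        by_cases h7 : v < (pvFER.length : Int)
        · rw [if_pos h7, if_pos ⟨h0v, h7⟩]
        · rw [if_neg h7, if_neg (by tauto)]
      · rw [if_neg hrng, PySem.List.foldl_append_singleton_eq_map, List.nil_append]
        rfl
    · -- some name does not parse: both sides take the word-like/keep rule
      have hflags : ((cns.map (fun cn => (PySem.Int.ofStr? cn).isSome)).all (fun b => b)) = false := by
        rw [Bool.eq_false_iff]; intro h; exact hP (by simpa [List.all_eq_true] using h)
      have hBnum : (cns.all (fun cn => (PySem.Int.ofStr? cn).isSome)) = false := by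
        rw [Bool.eq_false_iff]; intro h; exact hP (List.all_eq_true.mp h)
      rw [hflags, hBnum]
      simp [pvWord]

-- ===== VERDICT (by name: the statement is the Claim_ definition above) =====
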